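-- pv_equiv track=rewrite | github.com/SKM1007/Plusegen-Coding-assignment | Pulsegen-main/pulsegen/review_scraper/scraper.py | detect_blocked
-- ===== SOURCE A (Python) =====
-- def detect_blocked(html: str) -> bool:
--     """
--     Heuristic: detect common block/interstitial pages.
--     """
--     needles = [
--         "captcha",
--         "Access Denied",
--         "unusual traffic",
--         "verify you are human",
--         "robot",
--         "blocked",
--         "Cloudflare",
--         "Please enable cookies",
--     ]
--     low = html.lower()
--     return any(n.lower() in low for n in needles)
-- ===== SOURCE B (Python) =====
-- def detect_blocked(html: str) -> bool:
--     # One left-to-right pass over the text: at each position, test whether any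
--     # needle matches there case-insensitively (no full lowered copy of html,
--     # no 8 separate substring scans).
--     needles = (
--         "captcha",
--         "access denied",
--         "unusual traffic",
--         "verify you are human",
--         "robot",
--         "blocked",
--         "cloudflare",
--         "please enable cookies",
--     )
--     for i in range(len(html)):
--         for n in needles:
--             if html[i:i + len(n)].lower() == n:
--                 return True
--     return False
-- ===== Notes on version B (the rewrite author's own statement) =====
-- stated objective: alternative
-- what changed: Instead of lowering the whole page and running eight independent substring scans, B makes a single left-to-right pass over the text and at each position tests whether any needle matches there case-insensitively.
import Mathlib
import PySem

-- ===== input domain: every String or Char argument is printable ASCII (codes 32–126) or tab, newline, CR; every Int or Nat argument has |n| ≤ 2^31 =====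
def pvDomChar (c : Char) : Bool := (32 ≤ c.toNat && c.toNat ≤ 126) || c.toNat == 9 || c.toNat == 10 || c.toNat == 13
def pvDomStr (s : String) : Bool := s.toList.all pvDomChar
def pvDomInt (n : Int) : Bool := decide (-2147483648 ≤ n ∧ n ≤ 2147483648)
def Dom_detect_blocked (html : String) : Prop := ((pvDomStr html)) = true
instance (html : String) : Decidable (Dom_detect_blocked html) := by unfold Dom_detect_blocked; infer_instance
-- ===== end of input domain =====

-- B replaces A's eight independent lowered-substring scans by a single left-to-right
-- pass testing every needle case-insensitively at each position (alternative structure, same cost class).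


-- ===== PORT A =====
def pvNeedlesA : List String :=
  ["captcha", "Access Denied", "unusual traffic", "verify you are human",
   "robot", "blocked", "Cloudflare", "Please enable cookies"]

def detect_blocked (html : String) : Bool :=
  let low := PySem.Str.lower html
  pvNeedlesA.any (fun n => PySem.Str.isIn (PySem.Str.lower n) low)

-- ===== PORT B =====
def pvNeedlesB : List (List Char) :=
  ["captcha".toList, "access denied".toList, "unusual traffic".toList,
   "verify you are human".toList, "robot".toList, "blocked".toList,
   "cloudflare".toList, "please enable cookies".toList]

-- the i-loop of Source B: recursion over the suffixes of the text; at each position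
-- the inner loop compares the lowered slice html[i:i+len(n)] with the needle
def pvScanB : List Char → Bool
  | [] => false
  | c :: t =>
      pvNeedlesB.any (fun n => PySem.Chars.lower ((c :: t).take n.length) == n) || pvScanB t

def detect_blocked_alt (html : String) : Bool := pvScanB html.toList

-- ===== PRECONDITION & SPEC =====
def Spec_detect_blocked (html : String) (out : Bool) : Prop := out = detect_blocked_alt html
instance (html : String) (out : Bool) : Decidable (Spec_detect_blocked html out) := by unfold Spec_detect_blocked; infer_instance

-- ===== CLAIM (what is proved, stated in full; the proofs are below) =====
def Claim_equal_detect_blocked : Prop := ∀ (html : String), Dom_detect_blocked html → Spec_detect_blocked html (detect_blocked html)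

-- ===== LEMMAS AND PROOFS =====

theorem pv_needles_map :
    pvNeedlesB = pvNeedlesA.map (fun s => PySem.Chars.lower s.toList) := by decide

theorem pv_lower_eq_map (l : List Char) :
    PySem.Chars.lower l = l.map PySem.Chars.lowerChar := rfl

theorem pv_prefix_check (n xs : List Char) :
    ((PySem.Chars.lower (xs.take n.length) == n) = true) ↔ n <+: PySem.Chars.lower xs := by
  rw [beq_iff_eq, pv_lower_eq_map, pv_lower_eq_map, List.map_take]
  rw [List.prefix_iff_eq_take, eq_comm]

theorem pv_scanB_iff (s : List Char) :
    pvScanB s = true ↔ ∃ n ∈ pvNeedlesB, n <:+: PySem.Chars.lower s := by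
  induction s with
  | nil =>
      simp only [pvScanB, Bool.false_eq_true, false_iff]
      rintro ⟨n, hn, hinf⟩
      have hne : ∀ n ∈ pvNeedlesB, n ≠ [] := by decide
      exact hne n hn (List.eq_nil_of_infix_nil hinf)
  | cons c t ih =>
      simp only [pvScanB, Bool.or_eq_true, List.any_eq_true, ih]
      have hcons : PySem.Chars.lower (c :: t) =
          PySem.Chars.lowerChar c :: PySem.Chars.lower t := rfl
      constructor
      · rintro (⟨n, hn, hp⟩ | ⟨n, hn, hi⟩)
        · exact ⟨n, hn, ((pv_prefix_check n (c :: t)).mp hp).isInfix⟩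
        · exact ⟨n, hn, by rw [hcons, List.infix_cons_iff]; exact Or.inr hi⟩
      · rintro ⟨n, hn, hi⟩
        rw [hcons, List.infix_cons_iff] at hi
        cases hi with
        | inl hp => exact Or.inl ⟨n, hn, (pv_prefix_check n (c :: t)).mpr (by rw [hcons]; exact hp)⟩
        | inr hs => exact Or.inr ⟨n, hn, hs⟩

theorem pv_A_iff (html : String) :
    detect_blocked html = true ↔
      ∃ n ∈ pvNeedlesA, PySem.Chars.lower n.toList <:+: PySem.Chars.lower html.toList := by
  simp [detect_blocked, List.any_eq_true, PySem.Chars.isIn_iff_infix]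

theorem pv_B_iff (html : String) :
    detect_blocked_alt html = true ↔
      ∃ n ∈ pvNeedlesA, PySem.Chars.lower n.toList <:+: PySem.Chars.lower html.toList := by
  rw [detect_blocked_alt, pv_scanB_iff, pv_needles_map]
  simp

-- ===== VERDICT (by name: the statement is the Claim_ definition above) =====
theorem detect_blocked_spec : Claim_equal_detect_blocked := by
  intro html _
  unfold Spec_detect_blocked
  have := (pv_A_iff html).trans (pv_B_iff html).symm
  cases hA : detect_blocked html <;> cases hB : detect_blocked_alt html <;>
    simp_all
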